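-- pv_equiv track=rewrite | github.com/cheran-senthil/bitcoin-keygen | keygen.py | private2public
-- ===== SOURCE A (Python) =====
-- def is_private_valid(private_key):
--     """check if a given private key is valid"""
--     N = (1 << 256) - 0x14551231950B75FC4402DA1732FC9BEBF  # order
--     return 0 < int(private_key, 16) < N
--
-- def private2public(private_key, compressed=False):
--     """returns the public key associated with a private key (hex string)"""
--     if not is_private_valid(private_key):
--         raise ValueError("{} is not a valid key".format(private_key))
--
--     # base point (generator)
--     G = (
--         0x79BE667EF9DCBBAC55A06295CE870B07029BFCDB2DCE28D959F2815B16F81798,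
--         0x483ADA7726A3C4655DA4FBFC0E1108A8FD17B448A68554199C47D08FFB10D4B8,
--     )
--
--     # field prime
--     P = 0xFFFFFFFFFFFFFFFFFFFFFFFFFFFFFFFFFFFFFFFFFFFFFFFFFFFFFFFEFFFFFC2F
--
--     def elliptic_add(p, q):
--         """addition operation on the elliptic curve"""
--         px, py = p
--         qx, qy = q
--
--         if p == q:
--             lam = (3 * px * px) * pow(2 * py, P - 2, P)
--         else:
--             lam = (qy - py) * pow(qx - px, P - 2, P)
--
--         rx = lam * lam - px - qx
--         ry = lam * (px - rx) - py
--         return (rx % P, ry % P)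
--
--     # compute G * private_key with repeated addition
--     x = int(private_key, 16)
--     p = None
--     for i in range(256):
--         if x & (1 << i):
--             p = G if p is None else elliptic_add(p, G)
--         G = elliptic_add(G, G)
--
--     px, py = p
--     if compressed:
--         return ("03" if py & 1 else "02") + hex(px)[2:]
--     return "04" + hex(px)[2:] + hex(py)[2:]
-- ===== SOURCE B (Python) =====
-- def is_private_valid(private_key):
--     """check if a given private key is valid"""
--     N = (1 << 256) - 0x14551231950B75FC4402DA1732FC9BEBF  # order
--     return 0 < int(private_key, 16) < N
--
-- def private2public(private_key, compressed=False):
--     """returns the public key associated with a private key (hex string)"""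
--     if not is_private_valid(private_key):
--         raise ValueError("{} is not a valid key".format(private_key))
--
--     G = (
--         0x79BE667EF9DCBBAC55A06295CE870B07029BFCDB2DCE28D959F2815B16F81798,
--         0x483ADA7726A3C4655DA4FBFC0E1108A8FD17B448A68554199C47D08FFB10D4B8,
--     )
--     P = 0xFFFFFFFFFFFFFFFFFFFFFFFFFFFFFFFFFFFFFFFFFFFFFFFFFFFFFFFEFFFFFC2F
--
--     def elliptic_add(p, q):
--         """addition operation on the elliptic curve"""
--         px, py = p
--         qx, qy = q
--         if p == q:
--             lam = (3 * px * px) * pow(2 * py, P - 2, P)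
--         else:
--             lam = (qy - py) * pow(qx - px, P - 2, P)
--         rx = lam * lam - px - qx
--         ry = lam * (px - rx) - py
--         return (rx % P, ry % P)
--
--     def trailing_zeros(x):
--         """index of the lowest set bit of x (x > 0)"""
--         t = 0
--         while x & 1 == 0:
--             x >>= 1
--             t += 1
--         return t
--
--     def double_times(g, n):
--         """apply curve doubling to g, n times"""
--         for _ in range(n):
--             g = elliptic_add(g, g)
--         return g
--
--     # iterate once per SET bit of the key: jump the running power g forward by
--     # the gap to the next set bit (trailing-zero arithmetic) and accumulate.
--     x = int(private_key, 16)
--     t = trailing_zeros(x)      # position of the lowest set bit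
--     g = double_times(G, t)     # running power of G, currently at that bit
--     p = g                      # accumulator starts there: no None state
--     x >>= t + 1                # consume everything up to and incl. that bit
--     while x:
--         t = trailing_zeros(x)
--         g = double_times(g, t + 1)
--         p = elliptic_add(p, g)
--         x >>= t + 1
--
--     px, py = p
--     if compressed:
--         return ("03" if py & 1 else "02") + hex(px)[2:]
--     return "04" + hex(px)[2:] + hex(py)[2:]
-- ===== Notes on version B (the rewrite author's own statement) =====
-- stated objective: alternative
-- what changed: A scans all 256 bit positions with a fixed range loop, testing x & (1<<i), doubling G every round and threading an Optional accumulator; B iterates once per SET bit only, computing the gap to the next set bit with trailing-zero arithmetic and jumping the running power forward by that gap, with no fixed 256-round scan, no per-position mask test and no Optional state.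
import Mathlib
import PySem

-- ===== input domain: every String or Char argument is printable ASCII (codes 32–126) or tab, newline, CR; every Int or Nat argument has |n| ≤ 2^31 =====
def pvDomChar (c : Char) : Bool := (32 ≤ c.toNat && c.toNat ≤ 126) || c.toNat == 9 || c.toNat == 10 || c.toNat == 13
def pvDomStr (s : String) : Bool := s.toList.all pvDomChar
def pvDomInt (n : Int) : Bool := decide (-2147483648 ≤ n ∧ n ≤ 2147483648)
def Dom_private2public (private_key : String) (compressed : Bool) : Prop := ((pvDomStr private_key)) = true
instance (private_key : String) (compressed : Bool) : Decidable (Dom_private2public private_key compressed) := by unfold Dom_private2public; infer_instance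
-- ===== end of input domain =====

-- B replaces A's fixed 256-round per-position scan (mask test + Optional
-- accumulator + unconditional doubling of G) by a per-set-bit loop driven by
-- trailing-zero gap arithmetic; objective: alternative decomposition, same output.

-- ===== shared context (identical code in both Pythons: curve constants,
-- elliptic_add with Python's pow(b, e, m), Python's hex(n)[2:]) =====

-- curve order bound used by is_private_valid
def pvN : Int := (1 <<< 256) - 0x14551231950B75FC4402DA1732FC9BEBF
-- field prime
def pvP : Int := 0xFFFFFFFFFFFFFFFFFFFFFFFFFFFFFFFFFFFFFFFFFFFFFFFFFFFFFFFEFFFFFC2F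
-- generator
def pvG : Int × Int :=
  (0x79BE667EF9DCBBAC55A06295CE870B07029BFCDB2DCE28D959F2815B16F81798,
   0x483ADA7726A3C4655DA4FBFC0E1108A8FD17B448A68554199C47D08FFB10D4B8)

-- Python's built-in pow(b, e, m) for e ≥ 0, m > 0: b^e % m by square-and-multiply
-- (exact: every step reduces with Python's % on a positive modulus)
def pyPowMod (b : Int) (e : Nat) (m : Int) : Int :=
  if h : e = 0 then PySem.Int.mod 1 m
  else
    let s := pyPowMod b (e / 2) m
    if e % 2 = 0 then PySem.Int.mod (s * s) m
    else PySem.Int.mod (PySem.Int.mod (s * s) m * PySem.Int.mod b m) m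
termination_by e
decreasing_by exact Nat.div_lt_self (Nat.pos_of_ne_zero h) (by norm_num)

-- elliptic_add, verbatim in both Pythons
def ellipticAdd (p q : Int × Int) : Int × Int :=
  let lam :=
    if p = q then (3 * p.1 * p.1) * pyPowMod (2 * p.2) (pvP - 2).toNat pvP
    else (q.2 - p.2) * pyPowMod (q.1 - p.1) (pvP - 2).toNat pvP
  let rx := lam * lam - p.1 - q.1
  let ry := lam * (p.1 - rx) - p.2
  (PySem.Int.mod rx pvP, PySem.Int.mod ry pvP)

-- hex(n)[2:] for n ≥ 0 (lowercase digits, "0" for 0), as both Pythons use it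
def hexDigit (d : Nat) : Char := if d < 10 then Char.ofNat (48 + d) else Char.ofNat (87 + d)
def hexChars (n : Nat) : List Char :=
  if h : n = 0 then []
  else hexChars (n / 16) ++ [hexDigit (n % 16)]
termination_by n
decreasing_by exact Nat.div_lt_self (Nat.pos_of_ne_zero h) (by norm_num)
def pyHex (n : Nat) : String := if n = 0 then "0" else String.ofList (hexChars n)

-- the shared final formatting ("03"/"02"+x or "04"+x+y)
def formatPoint (pt : Int × Int) (compressed : Bool) : String :=
  if compressed then
    (if PySem.Int.mod pt.2 2 = 1 then "03" else "02") ++ pyHex pt.1.toNat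
  else "04" ++ pyHex pt.1.toNat ++ pyHex pt.2.toNat

-- ===== PORT A =====
-- A's loop body for bit i: test x & (1 << i), update p, then double g
def stepA (x : Nat) (st : (Int × Int) × Option (Int × Int)) (i : Nat) :
    (Int × Int) × Option (Int × Int) :=
  let p := if x &&& (1 <<< i) ≠ 0 then
             some (match st.2 with | none => st.1 | some pp => ellipticAdd pp st.1)
           else st.2
  (ellipticAdd st.1 st.1, p)

def private2public (private_key : String) (compressed : Bool) : String :=
  match PySem.Int.ofStrBase? private_key 16 with
  | none => ""          -- int(private_key, 16) raises ValueError: excluded by Pre_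
  | some v =>
    if 0 < v ∧ v < pvN then
      let x := v.toNat   -- exact: the guard ensures 0 < v
      let st := (List.range 256).foldl (stepA x) (pvG, none)
      match st.2 with
      | some pt => formatPoint pt compressed
      | none => ""      -- unreachable (x > 0): Python would fail unpacking None
    else ""             -- explicit raise ValueError: excluded by Pre_

-- ===== PORT B =====
-- trailing_zeros: Python's 'while x & 1 == 0' loop; only called with x > 0
-- (Python would loop forever on 0; the port's 0 branch is never reached)
def trailingZeros (x : Nat) : Nat :=
  if h : x % 2 = 0 ∧ x ≠ 0 then trailingZeros (x / 2) + 1 else 0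
termination_by x
decreasing_by exact Nat.div_lt_self (Nat.pos_of_ne_zero h.2) (by norm_num)

-- double_times: the 'for _ in range(n)' doubling loop
def doubleTimes (g : Int × Int) (n : Nat) : Int × Int :=
  (List.range n).foldl (fun a _ => ellipticAdd a a) g

-- the 'while x:' loop of B: once per set bit, jump g by the gap and accumulate
def loopB (x : Nat) (g p : Int × Int) : Int × Int :=
  if h : x = 0 then p
  else
    let t := trailingZeros x
    let g' := doubleTimes g (t + 1)
    loopB (x >>> (t + 1)) g' (ellipticAdd p g')
termination_by x
decreasing_by
  simp only [Nat.shiftRight_eq_div_pow]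
  exact Nat.div_lt_self (Nat.pos_of_ne_zero h)
    (Nat.one_lt_pow (Nat.succ_ne_zero _) (by norm_num))

def private2public_alt (private_key : String) (compressed : Bool) : String :=
  match PySem.Int.ofStrBase? private_key 16 with
  | none => ""          -- int(private_key, 16) raises ValueError: excluded by Pre_
  | some v =>
    if 0 < v ∧ v < pvN then
      let x := v.toNat
      let t := trailingZeros x
      let g := doubleTimes pvG t
      formatPoint (loopB (x >>> (t + 1)) g g) compressed
    else ""             -- explicit raise ValueError: excluded by Pre_

-- ===== PRECONDITION & SPEC =====
-- Pre_: exactly the inputs on which A returns (int(s,16) parses and the key is in range);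
-- elsewhere A raises ValueError.
def Pre_private2public (private_key : String) (compressed : Bool) : Prop :=
  0 < (PySem.Int.ofStrBase? private_key 16).getD 0 ∧
  (PySem.Int.ofStrBase? private_key 16).getD 0 < pvN
instance (private_key : String) (compressed : Bool) : Decidable (Pre_private2public private_key compressed) := by unfold Pre_private2public; infer_instance

def pvWitness_private2public : String × Bool := ("3", false)

def Spec_private2public (private_key : String) (compressed : Bool) (out : String) : Prop := out = private2public_alt private_key compressed
instance (private_key : String) (compressed : Bool) (out : String) : Decidable (Spec_private2public private_key compressed out) := by unfold Spec_private2public; infer_instance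

-- ===== CLAIM (what is proved, stated in full; the proofs are below) =====
def Claim_equal_private2public : Prop := ∀ (private_key : String) (compressed : Bool), Dom_private2public private_key compressed → Pre_private2public private_key compressed → Spec_private2public private_key compressed (private2public private_key compressed)

-- ===== LEMMAS AND PROOFS =====

-- the ascending list of doublings of g selected by the set bits of x
-- (proof-only intermediate: both programs' point computations reduce to it)
def collectPowers (x : Nat) (g : Int × Int) : List (Int × Int) :=
  if h : x = 0 then []
  else (if x % 2 = 1 then [g] else []) ++ collectPowers (x / 2) (ellipticAdd g g)
termination_by x
decreasing_by exact Nat.div_lt_self (Nat.pos_of_ne_zero h) (by norm_num)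

-- fold elliptic_add over a list, starting from an optional accumulator
def foldOpt (p : Option (Int × Int)) : List (Int × Int) → Option (Int × Int)
  | [] => p
  | q :: qs => foldOpt (some (match p with | none => q | some pp => ellipticAdd pp q)) qs

theorem foldOpt_some (l : List (Int × Int)) : ∀ p, foldOpt (some p) l = some (l.foldl ellipticAdd p) := by
  induction l with
  | nil => intro p; rfl
  | cons q qs ih => intro p; simpa [foldOpt, List.foldl] using ih (ellipticAdd p q)

theorem mask_testBit (x i : Nat) : (x &&& (1 <<< i) ≠ 0) ↔ x.testBit i := by
  rw [Nat.one_shiftLeft, Nat.and_two_pow]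
  cases h : x.testBit i <;> simp [h]

-- A-side invariant: A's masked range-fold computes foldOpt over the selected powers
theorem foldA_eq (n : Nat) : ∀ (x : Nat) (g : Int × Int) (p : Option (Int × Int)),
    x < 2 ^ n →
    ((List.range n).foldl (stepA x) (g, p)).2 = foldOpt p (collectPowers x g) := by
  induction n with
  | zero =>
    intro x g p hx
    interval_cases x
    simp [collectPowers, foldOpt]
  | succ n ih =>
    intro x g p hx
    have hstep : (fun st i => stepA x st (Nat.succ i)) = stepA (x / 2) := by
      funext st i
      have : (x &&& (1 <<< (i + 1)) ≠ 0) = ((x / 2) &&& (1 <<< i) ≠ 0) := by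
        simp only [mask_testBit, Nat.testBit_add_one]
      simp only [stepA, Nat.succ_eq_add_one, this]
    have h2 : 2 ^ (n + 1) = 2 * 2 ^ n := by ring
    have hx2 : x / 2 < 2 ^ n := by omega
    have hc : (x &&& (1 <<< 0) ≠ 0) = (x % 2 = 1) := by
      simp only [mask_testBit, Nat.testBit_zero, decide_eq_true_eq]
    rw [List.range_succ_eq_map]
    simp only [List.foldl_cons, List.foldl_map, hstep]
    rw [ih (x / 2) _ _ hx2]
    by_cases hx0 : x = 0
    · subst hx0
      simp [stepA, collectPowers, foldOpt]
    · conv_rhs => rw [collectPowers]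
      simp only [hx0, dite_false, stepA, hc]
      by_cases hb : x % 2 = 1 <;> simp [hb, foldOpt]

-- peel a doubling off the left of doubleTimes
theorem doubleTimes_succ_left (g : Int × Int) (n : Nat) :
    doubleTimes g (n + 1) = doubleTimes (ellipticAdd g g) n := by
  unfold doubleTimes
  rw [List.range_succ_eq_map]
  simp [List.foldl_map]

-- peel a doubling off the right of doubleTimes
theorem doubleTimes_succ_right (g : Int × Int) (n : Nat) :
    doubleTimes g (n + 1) = ellipticAdd (doubleTimes g n) (doubleTimes g n) := by
  unfold doubleTimes
  rw [List.range_succ]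
  simp

-- splitting the selected-powers list at the lowest set bit of x
theorem collect_split : ∀ (x : Nat), x ≠ 0 → ∀ (g : Int × Int),
    collectPowers x g =
      doubleTimes g (trailingZeros x) ::
        collectPowers (x >>> (trailingZeros x + 1)) (doubleTimes g (trailingZeros x + 1)) := by
  intro x
  induction x using Nat.strong_induction_on with
  | _ x ih =>
    intro hx g
    by_cases he : x % 2 = 1
    · have ht : trailingZeros x = 0 := by
        rw [trailingZeros]; simp [he]
      rw [collectPowers, ht]
      simp only [hx, dite_false, he, if_pos rfl]
      have : x >>> 1 = x / 2 := by simp [Nat.shiftRight_eq_div_pow]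
      rw [this]
      have h0 : doubleTimes g 0 = g := rfl
      have h1 : doubleTimes g 1 = ellipticAdd g g := by
        unfold doubleTimes; simp [List.range_succ]
      rw [h0, h1]
      rfl
    · have he' : x % 2 = 0 := by omega
      have hx2 : x / 2 ≠ 0 := by omega
      have ht : trailingZeros x = trailingZeros (x / 2) + 1 := by
        rw [trailingZeros]; simp [he', hx]
      have hcp : collectPowers x g = collectPowers (x / 2) (ellipticAdd g g) := by
        rw [collectPowers]; simp [hx, he]
      rw [hcp, ih (x / 2) (Nat.div_lt_self (Nat.pos_of_ne_zero hx) (by norm_num)) hx2, ht]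
      have hshift : (x / 2) >>> (trailingZeros (x / 2) + 1) = x >>> (trailingZeros (x / 2) + 1 + 1) := by
        simp only [Nat.shiftRight_eq_div_pow]
        rw [Nat.div_div_eq_div_mul]
        congr 1
        ring
      rw [hshift, ← doubleTimes_succ_left, ← doubleTimes_succ_left]

-- B-side invariant: the gap loop is the left fold over the remaining selected powers
theorem loopB_eq : ∀ (x : Nat) (g p : Int × Int),
    loopB x g p = (collectPowers x (ellipticAdd g g)).foldl ellipticAdd p := by
  intro x
  induction x using Nat.strong_induction_on with
  | _ x ih =>
    intro g p
    by_cases hx : x = 0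
    · subst hx; rw [loopB, collectPowers]; simp
    · rw [loopB]
      simp only [hx, dite_false]
      rw [collect_split x hx (ellipticAdd g g)]
      have hlt : x >>> (trailingZeros x + 1) < x := by
        simp only [Nat.shiftRight_eq_div_pow]
        exact Nat.div_lt_self (Nat.pos_of_ne_zero hx)
          (Nat.one_lt_pow (Nat.succ_ne_zero _) (by norm_num))
      rw [ih _ hlt, List.foldl_cons, ← doubleTimes_succ_left, ← doubleTimes_succ_left,
        doubleTimes_succ_right, doubleTimes_succ_right, doubleTimes_succ_right]

-- ===== VERDICT (by name: the statement is the Claim_ definition above) =====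
theorem private2public_spec : Claim_equal_private2public := by
  intro private_key compressed _ hpre
  unfold Spec_private2public private2public private2public_alt
  unfold Pre_private2public at hpre
  revert hpre
  cases hparse : PySem.Int.ofStrBase? private_key 16 with
  | none => intro hpre; simp at hpre
  | some v =>
    intro hpre
    simp only [Option.getD_some] at hpre
    simp only [if_pos hpre]
    have hxpos : 0 < v.toNat := by have := hpre.1; omega
    have hxlt : v.toNat < 2 ^ 256 := by
      have h2 := hpre.2
      have hN : pvN < 2 ^ 256 := by unfold pvN; decide
      omega
    have hfold := foldA_eq 256 v.toNat pvG none hxlt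
    have hsplit := collect_split v.toNat (Nat.pos_iff_ne_zero.mp hxpos) pvG
    rw [hsplit] at hfold
    rw [foldOpt] at hfold
    rw [foldOpt_some] at hfold
    simp only [hfold]
    rw [loopB_eq, doubleTimes_succ_right]
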